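-- pv_equiv track=rewrite | github.com/baruselli/gps_tracks | splits_laps/utils.py | get_reduced_slices
-- ===== SOURCE A (Python) =====
-- def get_reduced_slices(slices):
--     reduced_slices=[]
--     for slice in slices:
--         reduced_slice = {}
--         for k,v in slice.items():
--             if k not in ["times","dists","alts","lats","long","speeds","times_strings","frequencies",
--                          "heartbeats","delta_times","delta_dists","computed_dists_m","csv_dists_m",
--                          "csv_dists","computed_dists"]:
--                 reduced_slice[k]=v
--         reduced_slices.append(reduced_slice)
--     return reduced_slices
-- ===== SOURCE B (Python) =====
-- _EXCLUDED = tuple(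
--     "times dists alts lats long speeds times_strings frequencies heartbeats "
--     "delta_times delta_dists computed_dists_m csv_dists_m csv_dists computed_dists".split()
-- )
--
-- def _strip(d):
--     r = dict(d)
--     for key in _EXCLUDED:
--         r.pop(key, None)
--     return r
--
-- def get_reduced_slices(slices):
--     return [_strip(s) for s in slices]
-- ===== Notes on version B (the rewrite author's own statement) =====
-- stated objective: simpler
-- what changed: B maps a helper over the slices that copies each dict whole and then deletes the fixed excluded keys (kept as a split word string) with pop(key, None), instead of A's accumulator loop that rebuilds each dict key by key testing membership in the excluded list.
import Mathlib
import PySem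

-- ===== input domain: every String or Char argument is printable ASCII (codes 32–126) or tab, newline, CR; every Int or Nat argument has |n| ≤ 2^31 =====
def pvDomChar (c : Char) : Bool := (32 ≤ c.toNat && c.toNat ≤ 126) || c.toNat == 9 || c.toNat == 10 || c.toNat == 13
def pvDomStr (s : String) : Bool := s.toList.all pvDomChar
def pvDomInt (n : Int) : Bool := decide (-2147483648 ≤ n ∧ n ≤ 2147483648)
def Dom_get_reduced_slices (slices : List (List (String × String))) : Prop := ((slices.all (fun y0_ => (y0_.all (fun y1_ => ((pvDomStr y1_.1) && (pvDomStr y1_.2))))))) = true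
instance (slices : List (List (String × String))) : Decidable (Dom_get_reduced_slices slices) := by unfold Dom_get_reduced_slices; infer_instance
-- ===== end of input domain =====

-- B maps a helper over the slices that copies each dict whole and deletes the fixed excluded
-- keys with pop(key, None), instead of A's rebuild-by-membership-test loop (objective: simpler).

-- ===== PORT A =====
-- the literal list A tests membership against
def pvExcluded : List String :=
  ["times", "dists", "alts", "lats", "long", "speeds", "times_strings", "frequencies",
   "heartbeats", "delta_times", "delta_dists", "computed_dists_m", "csv_dists_m",
   "csv_dists", "computed_dists"]

-- inner loop of A: 'for k,v in slice.items(): if k not in [...]: reduced_slice[k]=v'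
def pvReduceA (slice : List (String × String)) : PySem.Dict String String :=
  slice.foldl (fun rs kv => if kv.1 ∈ pvExcluded then rs else rs.insert kv.1 kv.2) PySem.Dict.empty

def get_reduced_slices (slices : List (List (String × String))) : List (List (String × String)) :=
  slices.foldl (fun reduced_slices slice => reduced_slices ++ [(pvReduceA slice).items]) []

-- ===== PORT B =====
-- B's module constant: _EXCLUDED = tuple("times dists … computed_dists".split())
def pvExcludedB : List String :=
  PySem.Str.split₀ ("times dists alts lats long speeds times_strings frequencies heartbeats " ++
    "delta_times delta_dists computed_dists_m csv_dists_m csv_dists computed_dists")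

-- helper _strip: 'r = dict(d); for key in _EXCLUDED: r.pop(key, None); return r'
def pvStrip (d : List (String × String)) : PySem.Dict String String :=
  pvExcludedB.foldl (fun r key => (r.pop? key).elim r Prod.snd) (PySem.Dict.ofList d)

-- '[_strip(s) for s in slices]'
def get_reduced_slices_alt (slices : List (List (String × String))) : List (List (String × String)) :=
  slices.map (fun s => (pvStrip s).items)

-- ===== PRECONDITION & SPEC =====
def Spec_get_reduced_slices (slices : List (List (String × String))) (out : List (List (String × String))) : Prop := out = get_reduced_slices_alt slices
instance (slices : List (List (String × String))) (out : List (List (String × String))) : Decidable (Spec_get_reduced_slices slices out) := by unfold Spec_get_reduced_slices; infer_instance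

-- ===== CLAIM (what is proved, stated in full; the proofs are below) =====
def Claim_equal_get_reduced_slices : Prop := ∀ (slices : List (List (String × String))), Dom_get_reduced_slices slices → Spec_get_reduced_slices slices (get_reduced_slices slices)

-- ===== LEMMAS AND PROOFS =====

-- B's split-built excluded word list is A's literal list
set_option maxRecDepth 8000 in
theorem pvExcludedB_eq : pvExcludedB = pvExcluded := by decide

-- keep only the non-excluded entries of a dict
def pvFilt (d : PySem.Dict String String) : PySem.Dict String String :=
  PySem.Dict.mk (d.items.filter (fun p => decide (p.1 ∉ pvExcluded)))

-- one pop(key, None) step filters that key out of the items list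
theorem pvPop_step (d : PySem.Dict String String) (k : String) :
    (d.pop? k).elim d Prod.snd
      = PySem.Dict.mk (d.items.filter (fun p => !(p.1 == k))) := by
  unfold PySem.Dict.pop?
  cases hg : d.get? k with
  | some v =>
    simp only [Option.map_some, Option.elim_some]
    rfl
  | none =>
    simp only [Option.map_none, Option.elim_none]
    have hc : d.contains k = false := by
      rw [PySem.Dict.contains_eq_isSome_get?, hg]; rfl
    unfold PySem.Dict.contains at hc
    cases d with
    | mk items =>
      simp only at hc ⊢
      congr 1
      refine (List.filter_eq_self.mpr ?_).symm
      intro p hp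
      simp only [List.any_eq_false] at hc
      simpa using hc p hp

theorem pvPopFold (excl : List String) (d : PySem.Dict String String) :
    excl.foldl (fun r key => (r.pop? key).elim r Prod.snd) d
      = PySem.Dict.mk (d.items.filter (fun p => decide (p.1 ∉ excl))) := by
  induction excl generalizing d with
  | nil =>
    simp only [List.foldl_nil, List.not_mem_nil, not_false_iff, decide_true, List.filter_true]
  | cons k rest ih =>
    simp only [List.foldl_cons]
    rw [pvPop_step, ih]
    congr 1
    simp only [List.filter_filter]
    apply List.filter_congr
    intro p _
    by_cases h1 : p.1 = k <;> by_cases h2 : p.1 ∈ rest <;> simp [h1, h2]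

-- map that only rewrites key-k entries: filtering drops them when k is excluded
theorem pvL1 (items : List (String × String)) (k v : String) (hk : k ∈ pvExcluded) :
    (items.map (fun p => if p.1 == k then (k, v) else p)).filter (fun p => decide (p.1 ∉ pvExcluded))
      = items.filter (fun p => decide (p.1 ∉ pvExcluded)) := by
  induction items with
  | nil => rfl
  | cons p ps ih =>
    by_cases hp : p.1 = k
    · have hb : (p.1 == k) = true := by simp [hp]
      have h1 : decide ((k, v).1 ∉ pvExcluded) = false := by simp [hk]
      have h2 : decide (p.1 ∉ pvExcluded) = false := by simp [hp, hk]
      simp only [List.map_cons, hb, if_true, List.filter_cons, h1, h2, Bool.false_eq_true,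
        if_false, ih]
    · have hb : (p.1 == k) = false := by simp [hp]
      simp only [List.map_cons, hb, Bool.false_eq_true, if_false, List.filter_cons, ih]

-- when k is not excluded, the rewrite-map commutes with the filter
theorem pvL2 (items : List (String × String)) (k v : String) (hk : k ∉ pvExcluded) :
    (items.map (fun p => if p.1 == k then (k, v) else p)).filter (fun p => decide (p.1 ∉ pvExcluded))
      = (items.filter (fun p => decide (p.1 ∉ pvExcluded))).map (fun p => if p.1 == k then (k, v) else p) := by
  induction items with
  | nil => rfl
  | cons p ps ih =>
    by_cases hp : p.1 = k
    · have hb : (p.1 == k) = true := by simp [hp]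
      have h1 : decide ((k, v).1 ∉ pvExcluded) = true := by simp [hk]
      have h2 : decide (p.1 ∉ pvExcluded) = true := by simp [hp, hk]
      simp only [List.map_cons, hb, if_true, List.filter_cons, h1, h2, List.map_cons, ih]
    · have hb : (p.1 == k) = false := by simp [hp]
      by_cases hpe : p.1 ∈ pvExcluded
      · have h2 : decide (p.1 ∉ pvExcluded) = false := by simp [hpe]
        simp only [List.map_cons, hb, Bool.false_eq_true, if_false, List.filter_cons, h2, ih]
      · have h2 : decide (p.1 ∉ pvExcluded) = true := by simp [hpe]
        simp only [List.map_cons, hb, Bool.false_eq_true, if_false, List.filter_cons, h2,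
          if_true, List.map_cons, ih]

-- filtering the excluded keys commutes with one insert
theorem pvFilt_insert (d : PySem.Dict String String) (k v : String) :
    pvFilt (d.insert k v)
      = if k ∈ pvExcluded then pvFilt d else (pvFilt d).insert k v := by
  cases d with
  | mk items =>
    unfold pvFilt PySem.Dict.insert PySem.Dict.contains
    by_cases hc : (items.any fun p => p.1 == k) = true
    · have hc' : ((items.filter (fun p => decide (p.1 ∉ pvExcluded))).any fun p => p.1 == k)
          = decide (k ∉ pvExcluded) := by
        by_cases hk : k ∈ pvExcluded
        · simp only [hk, not_true, decide_false, List.any_eq_false]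
          intro p hp
          have := (List.mem_filter.1 hp).2
          simp only [decide_eq_true_eq] at this
          simp only [ne_eq]
          intro h
          exact this ((show p.1 = k from by simpa using h) ▸ hk)
        · simp only [hk, not_false_iff, decide_true, List.any_eq_true]
          obtain ⟨p, hp, hpk⟩ := List.any_eq_true.mp hc
          exact ⟨p, List.mem_filter.2 ⟨hp, by simp [show p.1 = k from by simpa using hpk, hk]⟩, hpk⟩
      by_cases hk : k ∈ pvExcluded
      · simp only [hk, if_true, hc, hc', not_true, decide_false, Bool.false_eq_true, if_true]
        exact congrArg PySem.Dict.mk (pvL1 items k v hk)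
      · simp only [hk, if_false, hc, hc', not_false_iff, decide_true, if_true]
        exact congrArg PySem.Dict.mk (pvL2 items k v hk)
    · have hc' : ((items.filter (fun p => decide (p.1 ∉ pvExcluded))).any fun p => p.1 == k) = false := by
        rw [Bool.not_eq_true, List.any_eq_false] at hc
        simp only [List.any_eq_false]
        intro p hp
        exact hc p (List.mem_filter.1 hp).1
      rw [if_neg hc]
      by_cases hk : k ∈ pvExcluded
      · rw [if_pos hk]
        congr 1
        rw [List.filter_append]
        simp [hk]
      · rw [if_neg hk, if_neg (by rw [hc']; simp)]
        congr 1
        rw [List.filter_append]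
        simp [hk]

-- filtering a full copy built by inserts = A's filtered rebuild
theorem pvFilt_foldl (s : List (String × String)) (d : PySem.Dict String String) :
    pvFilt (s.foldl (fun acc p => acc.insert p.1 p.2) d)
      = s.foldl (fun rs kv => if kv.1 ∈ pvExcluded then rs else rs.insert kv.1 kv.2) (pvFilt d) := by
  induction s generalizing d with
  | nil => rfl
  | cons p ps ih =>
    simp only [List.foldl_cons]
    rw [ih, pvFilt_insert]

theorem pvReduce_eq (slice : List (String × String)) : pvReduceA slice = pvStrip slice := by
  unfold pvReduceA pvStrip
  rw [pvExcludedB_eq, pvPopFold]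
  show _ = pvFilt (PySem.Dict.ofList slice)
  unfold PySem.Dict.ofList PySem.Dict.update
  rw [pvFilt_foldl]
  rfl

theorem pvOuter (f : List (String × String) → List (String × String))
    (slices : List (List (String × String))) (acc : List (List (String × String))) :
    slices.foldl (fun a s => a ++ [f s]) acc = acc ++ slices.map f := by
  induction slices generalizing acc with
  | nil => simp
  | cons s rest ih => simp [ih]

-- ===== VERDICT (by name: the statement is the Claim_ definition above) =====
theorem get_reduced_slices_spec : Claim_equal_get_reduced_slices := by
  intro slices _
  show get_reduced_slices slices = get_reduced_slices_alt slices
  unfold get_reduced_slices get_reduced_slices_alt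
  rw [pvOuter]
  simp [pvReduce_eq]
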